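-- pv_equiv track=rewrite | github.com/neEl-a-engineer/FileMergeTool | src/file_merge_tool/domain/rule_matching.py | matched_literal_substrings
-- ===== SOURCE A (Python) =====
-- from collections.abc import Iterable
--
-- def matched_literal_substrings(
--     haystacks: Iterable[str],
--     literals: Iterable[str],
-- ) -> list[str]:
--     values = [haystack for haystack in haystacks if haystack]
--     matches: list[str] = []
--     for literal in literals:
--         if literal and any(literal in haystack for haystack in values):
--             matches.append(literal)
--     return matches
-- ===== SOURCE B (Python) =====
-- def matched_literal_substrings(haystacks, literals):
--     literals = list(literals)
--     pending = {lit for lit in literals if lit}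
--     matched = set()
--     for haystack in haystacks:
--         if not haystack or not pending:
--             continue
--         found = {lit for lit in pending if lit in haystack}
--         matched |= found
--         pending -= found
--     return [lit for lit in literals if lit in matched]
-- ===== Notes on version B (the rewrite author's own statement) =====
-- stated objective: alternative
-- what changed: Inverted the loop nest: B scans haystacks once, maintaining a shrinking 'pending' set of not-yet-matched literals (each literal is dropped from further testing after its first match, and scanning stops touching literals once all are matched), then emits the matched literals in the original literal order; A instead scans all haystacks afresh for every literal.
import Mathlib
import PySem

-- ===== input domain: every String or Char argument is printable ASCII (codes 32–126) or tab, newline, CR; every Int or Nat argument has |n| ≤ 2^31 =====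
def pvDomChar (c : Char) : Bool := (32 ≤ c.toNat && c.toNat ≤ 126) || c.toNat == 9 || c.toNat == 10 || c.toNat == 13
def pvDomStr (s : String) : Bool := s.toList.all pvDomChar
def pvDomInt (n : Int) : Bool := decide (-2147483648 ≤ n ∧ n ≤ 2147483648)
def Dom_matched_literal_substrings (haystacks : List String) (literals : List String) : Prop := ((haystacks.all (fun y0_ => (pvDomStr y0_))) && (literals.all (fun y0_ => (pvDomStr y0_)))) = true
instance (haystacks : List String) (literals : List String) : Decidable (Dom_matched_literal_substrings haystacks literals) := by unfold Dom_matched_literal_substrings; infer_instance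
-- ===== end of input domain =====

-- B inverts the loop nest: one pass over the haystacks with a shrinking set of still-unmatched
-- literals (each literal is tested only until its first match), then the matched literals are
-- emitted in the original literal order.  Objective: alternative; same results, A is reproduced exactly.

-- ===== PORT A =====
def matched_literal_substrings (haystacks : List String) (literals : List String) : List String :=
  -- values = [haystack for haystack in haystacks if haystack]
  let values := haystacks.filter (fun h => !(h == ""))
  -- for literal in literals: if literal and any(literal in haystack for haystack in values): matches.append(literal)
  literals.foldl
    (fun acc lit =>
      if !(lit == "") && values.any (fun h => PySem.Str.isIn lit h) then acc ++ [lit]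
      else acc)
    []

-- ===== PORT B =====
-- one step of B's loop body 'for haystack in haystacks: …' over the state (matched, pending)
def mlsStep (st : PySem.Set String × PySem.Set String) (h : String) :
    PySem.Set String × PySem.Set String :=
  if h == "" || st.2 == ([] : List String) then st
  else
    let found := st.2.filter (fun lit => PySem.Str.isIn lit h)
    (PySem.Set.update st.1 found, PySem.Set.diff st.2 found)

def matched_literal_substrings_alt (haystacks : List String) (literals : List String) : List String :=
  let pending := PySem.Set.ofList (literals.filter (fun lit => !(lit == "")))
  let st := haystacks.foldl mlsStep ((PySem.Set.empty : PySem.Set String), pending)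
  literals.filter (fun lit => PySem.Set.contains st.1 lit)

-- ===== PRECONDITION & SPEC =====
def Spec_matched_literal_substrings (haystacks : List String) (literals : List String) (out : List String) : Prop := out = matched_literal_substrings_alt haystacks literals
instance (haystacks : List String) (literals : List String) (out : List String) : Decidable (Spec_matched_literal_substrings haystacks literals out) := by unfold Spec_matched_literal_substrings; infer_instance

-- ===== CLAIM (what is proved, stated in full; the proofs are below) =====
def Claim_equal_matched_literal_substrings : Prop := ∀ (haystacks : List String) (literals : List String), Dom_matched_literal_substrings haystacks literals → Spec_matched_literal_substrings haystacks literals (matched_literal_substrings haystacks literals)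

-- ===== LEMMAS AND PROOFS =====

-- characterisation of B's loop state: matched collects the pending literals that occur in a
-- nonempty processed haystack; pending keeps the rest
theorem mlsStep_foldl_mem (hs : List String) (m p : List String) (lit : String) :
    (lit ∈ (hs.foldl mlsStep (m, p)).1 ↔
      lit ∈ m ∨ (lit ∈ p ∧ ∃ h ∈ hs, h ≠ "" ∧ PySem.Str.isIn lit h = true)) ∧
    (lit ∈ (hs.foldl mlsStep (m, p)).2 ↔
      lit ∈ p ∧ ¬ ∃ h ∈ hs, h ≠ "" ∧ PySem.Str.isIn lit h = true) := by
  induction hs generalizing m p with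
  | nil => simp
  | cons h hs ih =>
    simp only [List.foldl_cons]
    by_cases hemp : (h == "" || (p == ([] : List String))) = true
    · have hst : mlsStep (m, p) h = (m, p) := by
        simp only [mlsStep]
        rw [if_pos hemp]
      rw [hst]
      rcases ih m p with ⟨ih1, ih2⟩
      rw [ih1, ih2]
      simp only [Bool.or_eq_true, beq_iff_eq] at hemp
      simp only [List.exists_mem_cons_iff]
      rcases hemp with he | he
      · subst he; simp
      · subst he; simp
    · have hst : mlsStep (m, p) h =
          (PySem.Set.update m (p.filter (fun l => PySem.Str.isIn l h)),
           PySem.Set.diff p (p.filter (fun l => PySem.Str.isIn l h))) := by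
        simp only [mlsStep]
        rw [if_neg hemp]
      rw [hst]
      rcases ih (PySem.Set.update m (p.filter (fun l => PySem.Str.isIn l h)))
                (PySem.Set.diff p (p.filter (fun l => PySem.Str.isIn l h))) with ⟨ih1, ih2⟩
      rw [ih1, ih2, PySem.Set.mem_update, PySem.Set.mem_diff]
      simp only [Bool.or_eq_true, beq_iff_eq, not_or] at hemp
      obtain ⟨hne, -⟩ := hemp
      simp only [List.mem_filter, List.exists_mem_cons_iff, ne_eq]
      constructor
      · constructor
        · rintro ((hm | ⟨hp, hi⟩) | ⟨⟨hp, -⟩, he⟩)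
          · exact Or.inl hm
          · exact Or.inr ⟨hp, Or.inl ⟨hne, hi⟩⟩
          · exact Or.inr ⟨hp, Or.inr he⟩
        · rintro (hm | ⟨hp, (⟨-, hi⟩ | he)⟩)
          · exact Or.inl (Or.inl hm)
          · exact Or.inl (Or.inr ⟨hp, hi⟩)
          · by_cases hi : PySem.Str.isIn lit h = true
            · exact Or.inl (Or.inr ⟨hp, hi⟩)
            · exact Or.inr ⟨⟨hp, fun c => hi c.2⟩, he⟩
      · constructor
        · rintro ⟨⟨hp, hnf⟩, hnE⟩
          refine ⟨hp, ?_⟩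
          rintro (⟨-, hi⟩ | he)
          · exact hnf ⟨hp, hi⟩
          · exact hnE he
        · rintro ⟨hp, hno⟩
          exact ⟨⟨hp, fun c => hno (Or.inl ⟨hne, c.2⟩)⟩, fun e => hno (Or.inr e)⟩

-- ===== VERDICT (by name: the statement is the Claim_ definition above) =====
theorem matched_literal_substrings_spec : Claim_equal_matched_literal_substrings := by
  intro haystacks literals _
  show matched_literal_substrings haystacks literals = matched_literal_substrings_alt haystacks literals
  unfold matched_literal_substrings matched_literal_substrings_alt
  rw [PySem.List.foldl_append_if_eq_filter, List.nil_append]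
  apply List.filter_congr
  intro lit hlit
  rw [Bool.eq_iff_iff, PySem.Set.contains_iff]
  rcases mlsStep_foldl_mem haystacks (PySem.Set.empty : PySem.Set String)
      (PySem.Set.ofList (literals.filter (fun l => !(l == "")))) lit with ⟨h1, -⟩
  rw [h1, PySem.Set.mem_ofList]
  simp only [Bool.and_eq_true, Bool.not_eq_true', beq_eq_false_iff_ne, List.any_eq_true,
    List.mem_filter, PySem.Set.empty, List.not_mem_nil, false_or, ne_eq]
  constructor
  · rintro ⟨hne, h, hh, hsub⟩
    exact ⟨⟨hlit, hne⟩, h, hh.1, hh.2, hsub⟩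
  · rintro ⟨⟨-, hne⟩, h, hh, hne2, hsub⟩
    exact ⟨hne, h, ⟨hh, hne2⟩, hsub⟩
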